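-- pv_equiv track=rewrite | github.com/senkevinli/comp-programming | icpc/j.py | makeIt
-- ===== SOURCE A (Python) =====
-- dp = [0] * 1_200_000
--
-- def makeIt(x):
--     recipe = ''
--     while x > 1:
--         if x % 2 != 0 or dp[x - 1] <= dp[x // 2]:
--             recipe = '1+' + recipe
--             x = x - 1
--         else:
--             recipe = 'd+' + recipe
--             x = x // 2
--     return '1' + recipe
-- ===== SOURCE B (Python) =====
-- def makeIt(x):
--     # dp is all zeros in A, so its halving branch is dead: A always steps x -> x-1,
--     # prepending '1+'. Closed form, no loop.
--     return '1' + '1+' * (x - 1)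
-- ===== Notes on version B (the rewrite author's own statement) =====
-- stated objective: simpler
-- what changed: The loop and dp array are replaced by the closed form '1' + '1+'*(x-1), exploiting that the all-zero dp makes the halving branch dead.
import Mathlib
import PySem

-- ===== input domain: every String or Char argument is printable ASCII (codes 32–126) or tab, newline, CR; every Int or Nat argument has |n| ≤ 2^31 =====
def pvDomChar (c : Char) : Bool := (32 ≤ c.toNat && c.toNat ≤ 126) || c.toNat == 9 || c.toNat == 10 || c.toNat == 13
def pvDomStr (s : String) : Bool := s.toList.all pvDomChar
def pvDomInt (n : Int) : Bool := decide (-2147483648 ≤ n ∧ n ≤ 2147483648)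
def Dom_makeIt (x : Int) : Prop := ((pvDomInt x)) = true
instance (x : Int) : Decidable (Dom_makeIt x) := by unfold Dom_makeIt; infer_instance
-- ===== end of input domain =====

-- B replaces A's loop (whose dp-guarded halving branch is dead, dp being all zeros)
-- by the closed form '1' + '1+'*(x-1); simpler and asymptotically faster.


-- ===== PORT A =====
-- dp = [0] * 1_200_000 : a constant-zero list; dp[i] = 0 for every index taken
-- inside Pre_makeIt (which excludes exactly the x for which Python's dp[x-1]
-- would be out of range and raise IndexError).
def dpGet (_i : Int) : Int := 0

def makeItLoop (x : Int) (recipe : String) : String :=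
  if _h : 1 < x then
    if PySem.Int.mod x 2 ≠ 0 ∨ dpGet (x - 1) ≤ dpGet (PySem.Int.floordiv x 2) then
      makeItLoop (x - 1) ("1+" ++ recipe)
    else
      makeItLoop (PySem.Int.floordiv x 2) ("d+" ++ recipe)
  else
    recipe
termination_by x.toNat
decreasing_by
  · omega
  · have : PySem.Int.floordiv x 2 < x := by
      rw [PySem.Int.floordiv_lt_iff_lt_mul (by norm_num : (0:Int) < 2)]
      omega
    have h0 : (0:Int) ≤ PySem.Int.floordiv x 2 := by
      rw [PySem.Int.le_floordiv_iff_mul_le (by norm_num : (0:Int) < 2)]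
      omega
    omega


def makeIt (x : Int) : String := "1" ++ makeItLoop x ""

-- ===== PORT B =====
-- '1+' * (x - 1) ported as joining (x-1).toNat copies of "1+" (empty for x ≤ 1).
def makeIt_alt (x : Int) : String := "1" ++ String.join (List.replicate (x - 1).toNat "1+")

-- ===== PRECONDITION & SPEC =====
-- Pre_ excludes exactly the x on which Python's A raises IndexError
-- (even x > 1_200_000, first reached when x > 1_200_001, overrun dp).
def Pre_makeIt (x : Int) : Prop := x ≤ 1200001
instance (x : Int) : Decidable (Pre_makeIt x) := by unfold Pre_makeIt; infer_instance
def pvWitness_makeIt : Int := (7)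

def Spec_makeIt (x : Int) (out : String) : Prop := out = makeIt_alt x
instance (x : Int) (out : String) : Decidable (Spec_makeIt x out) := by unfold Spec_makeIt; infer_instance

-- ===== CLAIM (what is proved, stated in full; the proofs are below) =====
def Claim_equal_makeIt : Prop := ∀ (x : Int), Dom_makeIt x → Pre_makeIt x → Spec_makeIt x (makeIt x)

-- ===== LEMMAS AND PROOFS =====

theorem join_replicate_succ (k : Nat) (s : String) :
    String.join (List.replicate (k + 1) s) = String.join (List.replicate k s) ++ s := by
  rw [List.replicate_succ']
  simp [String.join, List.foldl_append]

theorem makeItLoop_eq (n : Nat) : ∀ (x : Int), x.toNat = n → ∀ (r : String),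
    makeItLoop x r = String.join (List.replicate (x - 1).toNat "1+") ++ r := by
  induction n using Nat.strong_induction_on with
  | _ n ih =>
    intro x hx r
    rw [makeItLoop]
    by_cases _h : 1 < x
    · have cond : PySem.Int.mod x 2 ≠ 0 ∨ dpGet (x - 1) ≤ dpGet (PySem.Int.floordiv x 2) := by
        right; simp [dpGet]
      have hlt : (x - 1).toNat < n := by omega
      have hk : (x - 1).toNat = (x - 1 - 1).toNat + 1 := by omega
      rw [dif_pos _h, if_pos cond, ih _ hlt (x - 1) rfl ("1+" ++ r), hk,
        join_replicate_succ, String.append_assoc]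
    · rw [dif_neg _h]
      have h0 : (x - 1).toNat = 0 := by omega
      rw [h0]
      simp [String.join]

-- ===== VERDICT (by name: the statement is the Claim_ definition above) =====
theorem makeIt_spec : Claim_equal_makeIt := by
  intro x _ _
  unfold Spec_makeIt makeIt makeIt_alt
  rw [makeItLoop_eq x.toNat x rfl ""]
  simp
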